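-- pv_equiv track=rewrite | github.com/JonChesterfield/PrefixTree | bench.py | would_match_on_prefix
-- ===== SOURCE A (Python) =====
-- def common_prefix(x,y):
--     if (len(y) < len(x)):
--         return False
--     for i in range(0,len(x)):
--         if x[i] != y[i]:
--             return False
--     return True
--
-- def would_match_on_prefix(keys,x):
--     assert(common_prefix((3,),(3,4,)))
--     assert(common_prefix((3,),(3,)))
--     assert(common_prefix((1,),(1,1,)))
--     assert(common_prefix((1,2,),(1,2,1,)))
--     assert(common_prefix((2,4),(2,4,5,)))
--     assert(common_prefix((1,2,),(1,2,1,)))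
--     assert(common_prefix((1,),(1,3,)))
--
--     for i in keys:
--         if common_prefix(i,x):
--             return True
--     return False
-- ===== SOURCE B (Python) =====
-- def would_match_on_prefix(keys, x):
--     # Enumerate the prefixes of x and test membership against keys.
--     for j in range(len(x) + 1):
--         if x[:j] in keys:
--             return True
--     return False
-- ===== Notes on version B (the rewrite author's own statement) =====
-- stated objective: alternative
-- what changed: Instead of scanning each key with an element-by-element prefix comparison, B enumerates the len(x)+1 prefixes of x and tests each for membership in keys; the self-test asserts and the helper are dropped.
import Mathlib
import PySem

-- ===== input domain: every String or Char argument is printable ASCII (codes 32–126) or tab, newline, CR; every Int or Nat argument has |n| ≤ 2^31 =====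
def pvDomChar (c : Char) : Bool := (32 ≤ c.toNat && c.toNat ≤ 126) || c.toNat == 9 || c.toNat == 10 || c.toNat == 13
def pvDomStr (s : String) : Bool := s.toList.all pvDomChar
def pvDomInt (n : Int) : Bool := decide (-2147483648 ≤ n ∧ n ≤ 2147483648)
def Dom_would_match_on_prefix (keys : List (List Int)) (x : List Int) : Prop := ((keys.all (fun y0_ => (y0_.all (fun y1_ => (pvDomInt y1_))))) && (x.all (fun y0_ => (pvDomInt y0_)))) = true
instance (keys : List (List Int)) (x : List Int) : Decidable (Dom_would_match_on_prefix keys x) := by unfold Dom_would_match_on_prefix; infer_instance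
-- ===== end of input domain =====

-- B replaces the per-key element-wise prefix scan by enumerating x's prefixes and testing membership in keys (simpler decomposition).


-- ===== PORT A =====
-- loop 'for i in range(0,len(x)): if x[i] != y[i]: return False'; indices are in range
-- (i < len(x) ≤ len(y)), so getD is exact here.
def cpLoop (x y : List Int) : List Nat → Bool
  | [] => true
  | i :: rest => if x.getD i 0 ≠ y.getD i 0 then false else cpLoop x y rest

def common_prefix (x y : List Int) : Bool :=
  if y.length < x.length then false
  else cpLoop x y (List.range x.length)

-- the asserts in A are constant self-tests that always pass; they are dropped.
def wmLoop (x : List Int) : List (List Int) → Bool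
  | [] => false
  | k :: rest => if common_prefix k x then true else wmLoop x rest

def would_match_on_prefix (keys : List (List Int)) (x : List Int) : Bool :=
  wmLoop x keys

-- ===== PORT B =====
-- 'for j in range(len(x)+1): if x[:j] in keys: return True'; x[:j] with 0 ≤ j is take j.
def altLoop (keys : List (List Int)) (x : List Int) : List Nat → Bool
  | [] => false
  | j :: rest => if x.take j ∈ keys then true else altLoop keys x rest

def would_match_on_prefix_alt (keys : List (List Int)) (x : List Int) : Bool :=
  altLoop keys x (List.range (x.length + 1))

-- ===== PRECONDITION & SPEC =====
def Spec_would_match_on_prefix (keys : List (List Int)) (x : List Int) (out : Bool) : Prop := out = would_match_on_prefix_alt keys x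
instance (keys : List (List Int)) (x : List Int) (out : Bool) : Decidable (Spec_would_match_on_prefix keys x out) := by unfold Spec_would_match_on_prefix; infer_instance

-- ===== CLAIM (what is proved, stated in full; the proofs are below) =====
def Claim_equal_would_match_on_prefix : Prop := ∀ (keys : List (List Int)) (x : List Int), Dom_would_match_on_prefix keys x → Spec_would_match_on_prefix keys x (would_match_on_prefix keys x)

-- ===== LEMMAS AND PROOFS =====

lemma cpLoop_all (x y : List Int) (l : List Nat) :
    cpLoop x y l = l.all (fun i => decide (x.getD i 0 = y.getD i 0)) := by
  induction l with
  | nil => rfl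
  | cons i rest ih =>
    simp only [cpLoop, List.all_cons, ih]
    by_cases h : x.getD i 0 = y.getD i 0 <;> simp

lemma common_prefix_iff (x y : List Int) :
    common_prefix x y = true ↔ x <+: y := by
  unfold common_prefix
  split
  · rename_i h
    simp only [Bool.false_eq_true, false_iff]
    intro hp
    exact absurd hp.length_le (by omega)
  · rename_i h
    replace h : x.length ≤ y.length := by omega
    rw [cpLoop_all]
    simp only [List.all_eq_true, List.mem_range, decide_eq_true_eq]
    constructor
    · intro hall
      rw [List.prefix_iff_eq_take]
      apply List.ext_getElem
      · simp; omega
      · intro i h1 h2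
        have hx : x.getD i 0 = x[i] := List.getD_eq_getElem x 0 h1
        have hi : i < y.length := lt_of_lt_of_le h1 h
        have hy : y.getD i 0 = y[i] := List.getD_eq_getElem y 0 hi
        have := hall i h1
        simp only [List.getElem_take]
        rw [hx, hy] at this
        exact this
    · intro hp i hi
      rw [List.getD_eq_getElem x 0 hi,
          List.getD_eq_getElem y 0 (lt_of_lt_of_le hi h)]
      exact List.IsPrefix.getElem hp hi

lemma wmLoop_iff (x : List Int) (ks : List (List Int)) :
    wmLoop x ks = true ↔ ∃ k ∈ ks, common_prefix k x = true := by
  induction ks with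
  | nil => simp [wmLoop]
  | cons k rest ih =>
    simp only [wmLoop]
    by_cases h : common_prefix k x = true <;> simp [h, ih]

lemma altLoop_iff (keys : List (List Int)) (x : List Int) (l : List Nat) :
    altLoop keys x l = true ↔ ∃ j ∈ l, x.take j ∈ keys := by
  induction l with
  | nil => simp [altLoop]
  | cons j rest ih =>
    simp only [altLoop]
    by_cases h : x.take j ∈ keys <;> simp [h, ih]

-- ===== VERDICT (by name: the statement is the Claim_ definition above) =====
theorem would_match_on_prefix_spec : Claim_equal_would_match_on_prefix := by
  intro keys x _
  unfold Spec_would_match_on_prefix would_match_on_prefix would_match_on_prefix_alt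
  rw [Bool.eq_iff_iff, wmLoop_iff, altLoop_iff]
  constructor
  · rintro ⟨k, hk, hcp⟩
    rw [common_prefix_iff] at hcp
    refine ⟨k.length, ?_, ?_⟩
    · simp only [List.mem_range]
      exact Nat.lt_succ_of_le hcp.length_le
    · rwa [← List.prefix_iff_eq_take.mp hcp]
  · rintro ⟨j, _, hmem⟩
    exact ⟨x.take j, hmem, (common_prefix_iff _ _).mpr (List.take_prefix j x)⟩
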